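-- pv_equiv track=rewrite | github.com/Shilpa3107/General_codes | Cus.py | is_valid_date
-- ===== SOURCE A (Python) =====
-- def is_valid_date(y, m, d, days_in_year, days_in_month):
--     if y < 1 or m < 1 or d < 1:
--         return False
--
--     base_months = days_in_year // days_in_month
--     rem = days_in_year % days_in_month
--     acc = 0
--     months = base_months
--
--     for i in range(1, y):
--         acc += rem
--         if acc >= days_in_month:
--             acc -= days_in_month
--
--     # Does the current year get a leap month?
--     if acc + rem >= days_in_month:
--         months += 1
--
--     return m <= months and d <= days_in_month
-- ===== SOURCE B (Python) =====
-- def is_valid_date(y, m, d, days_in_year, days_in_month):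
--     if y < 1 or m < 1 or d < 1:
--         return False
--     rem = days_in_year % days_in_month
--     # months in year y = base + (number of leap months started by year y)
--     #                         - (number started by year y-1), each count a floor division
--     months = (days_in_year // days_in_month
--               + (y * rem) // days_in_month
--               - ((y - 1) * rem) // days_in_month)
--     return m <= months and d <= days_in_month
-- ===== Notes on version B (the rewrite author's own statement) =====
-- stated objective: faster
-- what changed: replaces the O(y) leap-accumulator loop and the leap-month conditional with pure arithmetic: months = base + (y*rem)//dim - ((y-1)*rem)//dim, the difference of two cumulative leap counts
import Mathlib
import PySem

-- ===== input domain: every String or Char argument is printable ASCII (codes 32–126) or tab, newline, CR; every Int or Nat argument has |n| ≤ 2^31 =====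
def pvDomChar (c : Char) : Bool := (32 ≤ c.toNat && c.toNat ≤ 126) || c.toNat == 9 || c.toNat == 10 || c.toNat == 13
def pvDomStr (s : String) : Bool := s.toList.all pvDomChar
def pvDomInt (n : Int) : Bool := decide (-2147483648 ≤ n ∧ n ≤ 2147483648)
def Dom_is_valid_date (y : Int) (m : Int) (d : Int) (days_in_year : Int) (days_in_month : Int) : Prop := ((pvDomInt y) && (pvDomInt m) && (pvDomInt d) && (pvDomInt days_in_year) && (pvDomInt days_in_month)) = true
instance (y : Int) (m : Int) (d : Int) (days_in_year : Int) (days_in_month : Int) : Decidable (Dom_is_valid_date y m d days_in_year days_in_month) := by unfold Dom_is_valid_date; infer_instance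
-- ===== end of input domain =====

-- B replaces A's O(y) leap-accumulator loop with pure arithmetic (a difference of two cumulative floor divisions), asymptotically faster.


-- ===== PORT A =====
def is_valid_date (y : Int) (m : Int) (d : Int) (days_in_year : Int) (days_in_month : Int) : Bool :=
  if y < 1 ∨ m < 1 ∨ d < 1 then false
  else
    let base_months := PySem.Int.floordiv days_in_year days_in_month
    let rem := PySem.Int.mod days_in_year days_in_month
    let acc := (PySem.List.pyRange 1 y 1).foldl
      (fun acc _ => if acc + rem ≥ days_in_month then acc + rem - days_in_month else acc + rem) 0
    let months := if acc + rem ≥ days_in_month then base_months + 1 else base_months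
    decide (m ≤ months) && decide (d ≤ days_in_month)

-- ===== PORT B =====
def is_valid_date_alt (y : Int) (m : Int) (d : Int) (days_in_year : Int) (days_in_month : Int) : Bool :=
  if y < 1 ∨ m < 1 ∨ d < 1 then false
  else
    let rem := PySem.Int.mod days_in_year days_in_month
    let months := PySem.Int.floordiv days_in_year days_in_month
      + PySem.Int.floordiv (y * rem) days_in_month
      - PySem.Int.floordiv ((y - 1) * rem) days_in_month
    decide (m ≤ months) && decide (d ≤ days_in_month)

-- ===== PRECONDITION & SPEC =====
-- Pre_ excludes only the inputs where Python A raises ZeroDivisionError: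
-- days_in_month = 0 while the guard y,m,d ≥ 1 is passed (B raises there too).
def Pre_is_valid_date (y : Int) (m : Int) (d : Int) (days_in_year : Int) (days_in_month : Int) : Prop :=
  y < 1 ∨ m < 1 ∨ d < 1 ∨ days_in_month ≠ 0
instance (y : Int) (m : Int) (d : Int) (days_in_year : Int) (days_in_month : Int) : Decidable (Pre_is_valid_date y m d days_in_year days_in_month) := by unfold Pre_is_valid_date; infer_instance
def pvWitness_is_valid_date : Int × Int × Int × Int × Int := (3, 2, 15, 365, 30)

def Spec_is_valid_date (y : Int) (m : Int) (d : Int) (days_in_year : Int) (days_in_month : Int) (out : Bool) : Prop := out = is_valid_date_alt y m d days_in_year days_in_month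
instance (y : Int) (m : Int) (d : Int) (days_in_year : Int) (days_in_month : Int) (out : Bool) : Decidable (Spec_is_valid_date y m d days_in_year days_in_month out) := by unfold Spec_is_valid_date; infer_instance

-- ===== CLAIM =====
def Claim_equal_is_valid_date : Prop := ∀ (y : Int) (m : Int) (d : Int) (days_in_year : Int) (days_in_month : Int), Dom_is_valid_date y m d days_in_year days_in_month → Pre_is_valid_date y m d days_in_year days_in_month → Spec_is_valid_date y m d days_in_year days_in_month (is_valid_date y m d days_in_year days_in_month)

-- ===== LEMMAS AND PROOFS =====

-- The loop keeps acc in [0, dim) and each step is "add rem, reduce once", i.e. addition mod dim.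
theorem foldl_acc_mod (dim rem : Int) (_hd : 0 < dim) (hr0 : 0 ≤ rem) (hr : rem < dim) :
    ∀ (l : List Int) (acc : Int), 0 ≤ acc → acc < dim →
      l.foldl (fun a _ => if a + rem ≥ dim then a + rem - dim else a + rem) acc
        = (acc + (l.length : Int) * rem) % dim := by
  intro l
  induction l with
  | nil =>
      intro acc h0 h1
      simp [Int.emod_eq_of_lt h0 h1]
  | cons x xs ih =>
      intro acc h0 h1
      simp only [List.foldl_cons]
      by_cases hc : acc + rem ≥ dim
      · rw [if_pos hc, ih _ (by omega) (by omega)]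
        have : acc + rem - dim + (xs.length : Int) * rem
            = (acc + ((x :: xs).length : Int) * rem) - dim := by
          simp [List.length_cons]; ring
        rw [this, Int.sub_emod_right]
      · rw [if_neg hc, ih _ (by omega) (by omega)]
        congr 1
        simp [List.length_cons]; ring

-- One more leap step of the accumulator equals a unit increment of the cumulative floor count.
theorem leap_step_eq_ediv_diff (dim rem a : Int) (hd : 0 < dim) (hr0 : 0 ≤ rem) (hr : rem < dim) :
    (if a % dim + rem ≥ dim then (1 : Int) else 0) = (a + rem) / dim - a / dim := by
  have h1 : dim * (a / dim) + a % dim = a := Int.mul_ediv_add_emod a dim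
  have h2 : 0 ≤ a % dim := Int.emod_nonneg _ (by omega)
  have h3 : a % dim < dim := Int.emod_lt_of_pos _ hd
  have key : (a + rem) / dim = a / dim + (a % dim + rem) / dim := by
    conv_lhs => rw [← h1]
    rw [show dim * (a / dim) + a % dim + rem = a % dim + rem + (a / dim) * dim by ring]
    rw [Int.add_mul_ediv_right _ _ (by omega)]
    ring
  by_cases hc : a % dim + rem ≥ dim
  · have h4 : (a % dim + rem) / dim = 1 := by
      have h5 : (a % dim + rem - dim) / dim = 0 :=
        Int.ediv_eq_zero_of_lt (by omega) (by omega)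
      have h6 : a % dim + rem = a % dim + rem - dim + 1 * dim := by ring
      rw [h6, Int.add_mul_ediv_right _ _ (by omega), h5]; norm_num
    rw [if_pos hc, key, h4]; ring
  · have h4 : (a % dim + rem) / dim = 0 := Int.ediv_eq_zero_of_lt (by omega) (by omega)
    rw [if_neg hc, key, h4]; ring

theorem is_valid_date_spec : Claim_equal_is_valid_date := by
  intro y m d diy dim _ hpre
  unfold Spec_is_valid_date is_valid_date is_valid_date_alt
  split_ifs with hg
  · rfl
  · push_neg at hg
    obtain ⟨hy, hm, hd⟩ := hg
    rcases lt_trichotomy dim 0 with hneg | hzero | hpos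
    · have hdd : decide (d ≤ dim) = false := decide_eq_false (by omega)
      simp [hdd]
    · unfold Pre_is_valid_date at hpre
      omega
    · dsimp only
      rw [PySem.Int.mod_eq_emod_of_pos hpos,
          PySem.Int.floordiv_eq_ediv_of_pos hpos,
          PySem.Int.floordiv_eq_ediv_of_pos hpos,
          PySem.Int.floordiv_eq_ediv_of_pos hpos]
      have hr0 : 0 ≤ diy % dim := Int.emod_nonneg _ (by omega)
      have hr1 : diy % dim < dim := Int.emod_lt_of_pos _ hpos
      rw [foldl_acc_mod dim (diy % dim) hpos hr0 hr1 _ 0 le_rfl hpos]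
      rw [PySem.List.length_pyRange_one]
      have hy1 : ((y - 1).toNat : Int) = y - 1 := Int.toNat_of_nonneg (by omega)
      rw [hy1, zero_add]
      have hstep := leap_step_eq_ediv_diff dim (diy % dim) ((y - 1) * (diy % dim)) hpos hr0 hr1
      have hy2 : (y - 1) * (diy % dim) + diy % dim = y * (diy % dim) := by ring
      rw [hy2] at hstep
      by_cases hleap : (y - 1) * (diy % dim) % dim + diy % dim ≥ dim
      · rw [if_pos hleap]
        have h1 : (1 : Int) = y * (diy % dim) / dim - (y - 1) * (diy % dim) / dim := by
          rw [← hstep, if_pos hleap]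
        have h2 : diy / dim + 1
            = diy / dim + y * (diy % dim) / dim - (y - 1) * (diy % dim) / dim := by
          linarith
        conv_lhs => rw [h2]
      · rw [if_neg hleap]
        have h1 : (0 : Int) = y * (diy % dim) / dim - (y - 1) * (diy % dim) / dim := by
          rw [← hstep, if_neg hleap]
        have h2 : diy / dim
            = diy / dim + y * (diy % dim) / dim - (y - 1) * (diy % dim) / dim := by
          linarith
        conv_lhs => rw [h2]
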